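-- pv_equiv track=rewrite | github.com/milosvalko/Agdas | comperison/compare.py | match_columns
-- ===== SOURCE A (Python) =====
-- def match_columns(l1, l2):
--
--     # matches - position of column from first file with corresponding column from second file
--     matches = []
--
--     # prohibited column to comparing
--     prohibited = ['', 'Time', 'Campaign', 'Date', 'Accepted', 'Set', 'Drop', 'Year', 'Month', 'Day', 'Hour', 'Minute', 'Second']
--
--     # find corresponding columns
--     for i in range(len(l1)):
--
--         for j in range(len(l2)):
--
--             if l1[i].strip() == l2[j].strip() and l1[i].strip() not in prohibited:
--
--                 matches.append([i, j])
--                 break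
--
--     return matches
-- ===== SOURCE B (Python) =====
-- def match_columns(l1, l2):
--     prohibited = ['', 'Time', 'Campaign', 'Date', 'Accepted', 'Set', 'Drop',
--                   'Year', 'Month', 'Day', 'Hour', 'Minute', 'Second']
--     # stable sort of (stripped name, index) pairs by name: within equal names,
--     # indices stay in ascending order, so the leftmost slot of a name group
--     # carries the smallest index
--     pairs = sorted(((v.strip(), j) for j, v in enumerate(l2)), key=lambda p: p[0])
--     matches = []
--     for i, v in enumerate(l1):
--         s = v.strip()
--         if s in prohibited:
--             continue
--         # binary search for the leftmost pair whose name is >= s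
--         lo, hi = 0, len(pairs)
--         while lo < hi:
--             mid = (lo + hi) // 2
--             if pairs[mid][0] < s:
--                 lo = mid + 1
--             else:
--                 hi = mid
--         if lo < len(pairs) and pairs[lo][0] == s:
--             matches.append([i, pairs[lo][1]])
--     return matches
-- ===== Notes on version B (the rewrite author's own statement) =====
-- stated objective: faster
-- what changed: Replaces A's inner linear rescan of l2 for every l1 column by one stable sort of the stripped (name, index) pairs of l2 followed by a leftmost binary search per l1 column (stability keeps the smallest l2 index first within equal names).
import Mathlib
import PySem

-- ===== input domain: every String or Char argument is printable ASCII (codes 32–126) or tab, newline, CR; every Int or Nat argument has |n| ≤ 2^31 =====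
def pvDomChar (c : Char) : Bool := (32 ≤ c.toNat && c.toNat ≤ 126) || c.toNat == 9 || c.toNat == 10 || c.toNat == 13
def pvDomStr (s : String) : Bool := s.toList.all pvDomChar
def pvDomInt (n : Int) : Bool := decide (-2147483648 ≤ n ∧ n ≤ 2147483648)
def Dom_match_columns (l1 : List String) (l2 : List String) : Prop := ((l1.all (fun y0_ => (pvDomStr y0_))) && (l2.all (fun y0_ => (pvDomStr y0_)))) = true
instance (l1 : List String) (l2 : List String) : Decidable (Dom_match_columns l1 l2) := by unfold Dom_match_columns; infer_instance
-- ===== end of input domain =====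

-- B replaces A's nested rescans of l2 by one stable sort of the stripped l2
-- names with their indices followed by a binary search per l1 column: faster
-- (asymptotic, O((n+m) log m) vs O(n*m)).

-- ===== PORT A =====
def pvProhibited : List String :=
  ["", "Time", "Campaign", "Date", "Accepted", "Set", "Drop", "Year", "Month", "Day", "Hour", "Minute", "Second"]

-- inner 'for j in range(len(l2)) … break' of A, over enumerate(l2)
def pvFindJ (x : String) : List (Int × String) → Option Int
  | [] => none
  | (j, v) :: rest =>
    if PySem.Str.strip x == PySem.Str.strip v && !(pvProhibited.contains (PySem.Str.strip x)) then
      some j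
    else pvFindJ x rest

def match_columns (l1 : List String) (l2 : List String) : List (List Int) :=
  (PySem.List.enumerate l1).foldl (fun ms p =>
    match pvFindJ p.2 (PySem.List.enumerate l2) with
    | some j => ms ++ [[p.1, j]]
    | none => ms) []

-- ===== PORT B =====
-- pairs = sorted(((v.strip(), j) for j, v in enumerate(l2)), key=lambda p: p[0])
def pvPairs (l2 : List String) : List (String × Int) :=
  PySem.List.sorted ((PySem.List.enumerate l2).map (fun q => (PySem.Str.strip q.2, q.1))) (fun p => p.1)

-- the 'while lo < hi' leftmost binary search of B; lo, hi stay within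
-- [0, len pairs], so the getD default is never read
def pvBisect (pairs : List (String × Int)) (s : String) (lo hi : Nat) : Nat :=
  if lo < hi then
    let mid := (lo + hi) / 2
    if (pairs.getD mid ("", 0)).1 < s then pvBisect pairs s (mid + 1) hi
    else pvBisect pairs s lo mid
  else lo
termination_by hi - lo
decreasing_by all_goals omega

def match_columns_alt (l1 : List String) (l2 : List String) : List (List Int) :=
  let pairs := pvPairs l2
  (PySem.List.enumerate l1).foldl (fun ms p =>
    let s := PySem.Str.strip p.2
    if pvProhibited.contains s then ms
    else
      let lo := pvBisect pairs s 0 pairs.length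
      if lo < pairs.length ∧ (pairs.getD lo ("", 0)).1 = s then
        ms ++ [[p.1, (pairs.getD lo ("", 0)).2]]
      else ms) []

-- ===== PRECONDITION & SPEC =====
def Spec_match_columns (l1 : List String) (l2 : List String) (out : List (List Int)) : Prop := out = match_columns_alt l1 l2
instance (l1 : List String) (l2 : List String) (out : List (List Int)) : Decidable (Spec_match_columns l1 l2 out) := by unfold Spec_match_columns; infer_instance

-- ===== CLAIM (what is proved, stated in full; the proofs are below) =====
def Claim_equal_match_columns : Prop := ∀ (l1 : List String) (l2 : List String), Dom_match_columns l1 l2 → Spec_match_columns l1 l2 (match_columns l1 l2)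

-- ===== LEMMAS AND PROOFS =====

-- A's inner scan equals the prohibition test plus the first-match lookup
lemma pvFindJ_eq (x : String) (L : List (Int × String)) :
    pvFindJ x L =
      (if pvProhibited.contains (PySem.Str.strip x) then none
       else (L.find? (fun p => PySem.Str.strip p.2 == PySem.Str.strip x)).map (·.1)) := by
  induction L with
  | nil => simp [pvFindJ]
  | cons q L ih =>
    obtain ⟨j, v⟩ := q
    by_cases hp : pvProhibited.contains (PySem.Str.strip x) = true
    · have hp' : PySem.Str.strip x ∈ pvProhibited := by simpa using hp
      simp [pvFindJ, hp', ih]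
    · have hp' : PySem.Str.strip x ∉ pvProhibited := by simpa using hp
      by_cases hs : PySem.Str.strip v = PySem.Str.strip x
      · simp [pvFindJ, hp', hs]
      · have hs' : ¬ (PySem.Str.strip x = PySem.Str.strip v) := fun h => hs h.symm
        simp [pvFindJ, hp', hs, hs', ih]

-- stable insertion keeps a sorted-by-name list sorted
lemma pv_insertBy_pairwise (x : String × Int) (ys : List (String × Int))
    (h : ys.Pairwise (fun a b => a.1 ≤ b.1)) :
    (PySem.List.insertBy (fun a b => decide (a.1 < b.1)) x ys).Pairwise (fun a b => a.1 ≤ b.1) := by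
  induction ys with
  | nil => simp [PySem.List.insertBy]
  | cons y ys ih =>
    rw [List.pairwise_cons] at h
    obtain ⟨hy, hys⟩ := h
    by_cases hb : x.1 < y.1
    · simp only [PySem.List.insertBy, hb, decide_true, if_pos]
      refine List.Pairwise.cons ?_ (List.Pairwise.cons hy hys)
      intro z hz
      rcases List.mem_cons.mp hz with rfl | hz
      · exact le_of_lt hb
      · exact le_of_lt (lt_of_lt_of_le hb (hy z hz))
    · simp only [PySem.List.insertBy, hb, decide_false, if_neg, Bool.false_eq_true,
        not_false_eq_true]
      refine List.Pairwise.cons ?_ (ih hys)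
      intro z hz
      rcases (PySem.List.mem_insertBy _ x z ys).mp hz with rfl | hz
      · exact le_of_not_gt hb
      · exact hy z hz

-- stability of one insertion: among equal names, the new element lands last
lemma pv_filter_insertBy (x : String × Int) (ys : List (String × Int)) (c : String)
    (h : ys.Pairwise (fun a b => a.1 ≤ b.1)) :
    (PySem.List.insertBy (fun a b => decide (a.1 < b.1)) x ys).filter (fun p => p.1 == c) =
      ys.filter (fun p => p.1 == c) ++ (if x.1 == c then [x] else []) := by
  induction ys with
  | nil => simp [PySem.List.insertBy, List.filter_cons]
  | cons y ys ih =>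
    rw [List.pairwise_cons] at h
    obtain ⟨hy, hys⟩ := h
    by_cases hb : x.1 < y.1
    · simp only [PySem.List.insertBy, hb, decide_true, if_pos]
      by_cases hx : x.1 = c
      · have hnil : (y :: ys).filter (fun p => p.1 == c) = [] := by
          rw [List.filter_eq_nil_iff]
          intro z hz
          have hyz : y.1 ≤ z.1 := by
            rcases List.mem_cons.mp hz with rfl | hz
            · exact le_refl _
            · exact hy z hz
          have : c < z.1 := lt_of_lt_of_le (hx ▸ hb) hyz
          simp [ne_of_gt this]
        rw [List.filter_cons, hnil]
        simp [hx]
      · rw [List.filter_cons]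
        simp [hx]
    · simp only [PySem.List.insertBy, hb, decide_false, if_neg, Bool.false_eq_true,
        not_false_eq_true]
      rw [List.filter_cons, List.filter_cons, ih hys]
      by_cases hyc : y.1 = c <;> simp [hyc]

-- stability of the whole sort: the equal-name fibre is kept in input order
lemma pv_sorted_filter_aux (xs : List (String × Int)) (c : String) :
    ∀ acc : List (String × Int), acc.Pairwise (fun a b => a.1 ≤ b.1) →
    (xs.foldl (fun a x => PySem.List.insertBy (fun a b => decide (a.1 < b.1)) x a) acc).filter
        (fun p => p.1 == c) =
      acc.filter (fun p => p.1 == c) ++ xs.filter (fun p => p.1 == c) := by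
  induction xs with
  | nil => intro acc _; simp
  | cons x xs ih =>
    intro acc hacc
    rw [List.foldl_cons, ih _ (pv_insertBy_pairwise x acc hacc), pv_filter_insertBy x acc c hacc,
      List.filter_cons]
    by_cases hx : x.1 = c <;> simp [hx]

lemma pv_sorted_filter (xs : List (String × Int)) (c : String) :
    (PySem.List.sorted xs (fun p => p.1)).filter (fun p => p.1 == c) =
      xs.filter (fun p => p.1 == c) := by
  rw [PySem.List.sorted_eq_foldl_insertBy]
  simpa using pv_sorted_filter_aux xs c [] (by simp)

-- name monotonicity inside a sorted list, in getD form
lemma pv_getD_mono (ps : List (String × Int)) (hs : ps.Pairwise (fun a b => a.1 ≤ b.1))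
    (a b : Nat) (hab : a ≤ b) (hb : b < ps.length) :
    (ps.getD a ("", 0)).1 ≤ (ps.getD b ("", 0)).1 := by
  rcases Nat.lt_or_ge a b with h | h
  · rw [List.getD_eq_getElem ps _ (lt_trans h hb), List.getD_eq_getElem ps _ hb]
    exact List.pairwise_iff_getElem.mp hs a b _ _ h
  · have : a = b := le_antisymm hab h
    subst this; exact le_refl _

-- the binary search returns the leftmost position whose name is ≥ s
lemma pv_bisect_spec (ps : List (String × Int)) (hs : ps.Pairwise (fun a b => a.1 ≤ b.1))
    (s : String) :
    ∀ n lo hi, hi - lo = n → lo ≤ hi → hi ≤ ps.length →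
    (∀ m, m < lo → (ps.getD m ("", 0)).1 < s) →
    (∀ m, hi ≤ m → m < ps.length → ¬ (ps.getD m ("", 0)).1 < s) →
    pvBisect ps s lo hi ≤ ps.length ∧
      (∀ m, m < pvBisect ps s lo hi → (ps.getD m ("", 0)).1 < s) ∧
      (∀ m, pvBisect ps s lo hi ≤ m → m < ps.length → ¬ (ps.getD m ("", 0)).1 < s) := by
  intro n
  induction n using Nat.strong_induction_on with
  | _ n ih =>
    intro lo hi hn hlohi hhi hbelow habove
    rw [pvBisect]
    by_cases h : lo < hi
    · simp only [h, if_pos]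
      have hmidlo : lo ≤ (lo + hi) / 2 := by omega
      have hmidhi : (lo + hi) / 2 < hi := by omega
      by_cases hm : (ps.getD ((lo + hi) / 2) ("", 0)).1 < s
      · simp only [hm, if_pos]
        refine ih (hi - ((lo + hi) / 2 + 1)) (by omega) _ _ rfl (by omega) hhi ?_ habove
        intro m hmlt
        exact lt_of_le_of_lt (pv_getD_mono ps hs m ((lo + hi) / 2) (by omega) (by omega)) hm
      · simp only [hm, if_neg, not_false_eq_true]
        refine ih ((lo + hi) / 2 - lo) (by omega) _ _ rfl (by omega) (by omega) hbelow ?_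
        intro m hmle hmlen hlt
        exact hm (lt_of_le_of_lt (pv_getD_mono ps hs ((lo + hi) / 2) m hmle hmlen) hlt)
    · simp only [h, if_neg, not_false_eq_true]
      have : lo = hi := by omega
      exact ⟨by omega, hbelow, by simpa [this] using habove⟩

-- first equal-name element of a sorted list, read off at the bisect position
lemma pv_find_sorted (ps : List (String × Int)) (hs : ps.Pairwise (fun a b => a.1 ≤ b.1))
    (s : String) :
    ps.find? (fun p => p.1 == s) =
      (if pvBisect ps s 0 ps.length < ps.length ∧
          (ps.getD (pvBisect ps s 0 ps.length) ("", 0)).1 = s then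
        some (ps.getD (pvBisect ps s 0 ps.length) ("", 0))
      else none) := by
  obtain ⟨hk, hlt, hge⟩ := pv_bisect_spec ps hs s (ps.length - 0) 0 ps.length rfl
    (Nat.zero_le _) (le_refl _) (by omega) (by intro m h1 h2; omega)
  set k := pvBisect ps s 0 ps.length with hkdef
  by_cases hc : k < ps.length ∧ (ps.getD k ("", 0)).1 = s
  · rw [if_pos hc]
    obtain ⟨hklen, hkname⟩ := hc
    rw [List.getD_eq_getElem ps _ hklen] at hkname ⊢
    rw [List.find?_eq_some_iff_getElem]
    refine ⟨by simp [hkname], k, hklen, rfl, ?_⟩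
    intro j hj
    have := hlt j hj
    rw [List.getD_eq_getElem ps _ (lt_trans hj hklen)] at this
    simp [ne_of_lt this]
  · rw [if_neg hc, List.find?_eq_none]
    intro x hx
    obtain ⟨m, hm, rfl⟩ := List.mem_iff_getElem.mp hx
    rcases Nat.lt_or_ge m k with hmk | hmk
    · have := hlt m hmk
      rw [List.getD_eq_getElem ps _ hm] at this
      simp [ne_of_lt this]
    · have hklen : k < ps.length := lt_of_le_of_lt hmk hm
      have hks : ¬ (ps.getD k ("", 0)).1 < s := hge k (le_refl _) hklen
      have hms : ¬ (ps.getD m ("", 0)).1 < s := hge m hmk hm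
      rw [List.getD_eq_getElem ps _ hm] at hms
      simp only [beq_iff_eq]
      intro heq
      apply hc
      refine ⟨hklen, le_antisymm ?_ (le_of_not_gt hks)⟩
      rw [List.getD_eq_getElem ps _ hklen]
      calc ps[k].1 ≤ ps[m].1 := by
              rw [← List.getD_eq_getElem ps _ hklen, ← List.getD_eq_getElem ps _ hm]
              exact pv_getD_mono ps hs k m hmk hm
        _ = s := heq

-- B's per-element decision equals A's inner scan
lemma pv_step_eq (l2 : List String) (ms : List (List Int)) (p : Int × String) :
    (match pvFindJ p.2 (PySem.List.enumerate l2) with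
      | some j => ms ++ [[p.1, j]]
      | none => ms) =
    (let s := PySem.Str.strip p.2
     if pvProhibited.contains s then ms
     else
       let lo := pvBisect (pvPairs l2) s 0 (pvPairs l2).length
       if lo < (pvPairs l2).length ∧ ((pvPairs l2).getD lo ("", 0)).1 = s then
         ms ++ [[p.1, ((pvPairs l2).getD lo ("", 0)).2]]
       else ms) := by
  rw [pvFindJ_eq]
  by_cases hp : pvProhibited.contains (PySem.Str.strip p.2) = true
  · have hp' : PySem.Str.strip p.2 ∈ pvProhibited := by simpa using hp
    simp [hp']
  · simp only [hp, if_neg, Bool.false_eq_true, not_false_eq_true]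
    have hs : (pvPairs l2).Pairwise (fun a b => a.1 ≤ b.1) :=
      PySem.List.sorted_pairwise _ _
    have hfind : (pvPairs l2).find? (fun q => q.1 == PySem.Str.strip p.2) =
        ((PySem.List.enumerate l2).find?
            (fun q => PySem.Str.strip q.2 == PySem.Str.strip p.2)).map
          (fun q => (PySem.Str.strip q.2, q.1)) := by
      rw [← List.head?_filter, ← List.head?_filter, pvPairs, pv_sorted_filter,
        List.filter_map, List.head?_map]
      rfl
    rw [pv_find_sorted _ hs (PySem.Str.strip p.2)] at hfind
    by_cases hc : pvBisect (pvPairs l2) (PySem.Str.strip p.2) 0 (pvPairs l2).length <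
        (pvPairs l2).length ∧
        ((pvPairs l2).getD
            (pvBisect (pvPairs l2) (PySem.Str.strip p.2) 0 (pvPairs l2).length) ("", 0)).1 =
          PySem.Str.strip p.2
    · rw [if_pos hc] at hfind
      obtain ⟨q, hq, hq2⟩ := Option.map_eq_some_iff.mp hfind.symm
      have h2 : q.1 = ((pvPairs l2).getD
          (pvBisect (pvPairs l2) (PySem.Str.strip p.2) 0 (pvPairs l2).length) ("", 0)).2 :=
        congrArg Prod.snd hq2
      rw [hq, if_pos hc]
      simp only [Option.map_some]
      rw [h2]
    · rw [if_neg hc] at hfind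
      have : ((PySem.List.enumerate l2).find?
          (fun q => PySem.Str.strip q.2 == PySem.Str.strip p.2)) = none := by
        cases h : (PySem.List.enumerate l2).find?
            (fun q => PySem.Str.strip q.2 == PySem.Str.strip p.2) with
        | none => rfl
        | some q => rw [h] at hfind; simp at hfind
      rw [this, if_neg hc]
      simp

theorem match_columns_spec_aux (l1 l2 : List String) :
    match_columns l1 l2 = match_columns_alt l1 l2 := by
  unfold match_columns match_columns_alt
  exact PySem.List.foldl_congr_mem _ _ _ _ (fun ms p _ => pv_step_eq l2 ms p)

-- ===== VERDICT (by name: the statement is the Claim_ definition above) =====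
theorem match_columns_spec : Claim_equal_match_columns := by
  intro l1 l2 _
  unfold Spec_match_columns
  exact match_columns_spec_aux l1 l2
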